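-- pv_equiv track=rewrite | github.com/chsatish26/vc_pitch_analyzer | consolidator.py | _generate_main_comment
-- ===== SOURCE A (Python) =====
-- from typing import Dict, Any, List
--
-- def _generate_main_comment(analysis_results: Dict[str, Any],
--                           company_details: Dict[str, Any]) -> str:
--     """
--     Generate main comment for the report.
--
--     Args:
--         analysis_results: Analysis results from all agents
--         company_details: Company details
--
--     Returns:
--         Main comment text
--     """
--     company_name = company_details.get("name")
--
--     # Look for a strong section to highlight
--     highlight_section = None
--     highlight_metric = None
--
--     # Check product-market fit first
--     pmf_analysis = analysis_results.get("ProductMarketFit", {})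
--     if pmf_analysis:
--         for key, value in pmf_analysis.items():
--             if isinstance(value, dict) and value.get("final_score", 0) >= 8:
--                 highlight_section = "ProductMarketFit"
--                 highlight_metric = key
--                 break
--
--     # If no strong PMF, check market
--     if not highlight_section:
--         market_analysis = analysis_results.get("MarketAnalysis", {})
--         if market_analysis:
--             for key, value in market_analysis.items():
--                 if isinstance(value, dict) and value.get("final_score", 0) >= 8:
--                     highlight_section = "MarketAnalysis"
--                     highlight_metric = key
--                     break
--
--     # If still no highlight, check finance
--     if not highlight_section:
--         finance_analysis = analysis_results.get("Finance", {})
--         if finance_analysis: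
--             for key, value in finance_analysis.items():
--                 if isinstance(value, dict) and value.get("final_score", 0) >= 8:
--                     highlight_section = "Finance"
--                     highlight_metric = key
--                     break
--
--     # Generate comment based on highlight section
--     if highlight_section == "ProductMarketFit":
--         return f"{company_name} demonstrates strong performance in ProductMarketFit with validated metrics and market alignment."
--     elif highlight_section == "MarketAnalysis":
--         return f"{company_name} operates in an attractive market with validated TAM and growth potential."
--     elif highlight_section == "Finance":
--         return f"{company_name} shows strong financial fundamentals with sustainable growth trajectory."
--     else:
--         return f"{company_name} presents an investment opportunity with several areas of notable strength."
-- ===== SOURCE B (Python) =====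
-- def _generate_main_comment(analysis_results, company_details):
--     """Single pass over analysis_results.items() keeping the best (lowest) priority
--     rank seen so far; the final comment is picked by indexing a comment table with
--     that rank, instead of three staged lookup-and-scan blocks with early exit."""
--     company_name = company_details.get("name")
--     priority = {"ProductMarketFit": 0, "MarketAnalysis": 1, "Finance": 2}
--     comments = [
--         " demonstrates strong performance in ProductMarketFit with validated metrics and market alignment.",
--         " operates in an attractive market with validated TAM and growth potential.",
--         " shows strong financial fundamentals with sustainable growth trajectory.",
--         " presents an investment opportunity with several areas of notable strength.",
--     ]
--     best = 3
--     for section, content in analysis_results.items():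
--         rank = priority.get(section, 3)
--         if rank < best and any(isinstance(v, dict) and v.get("final_score", 0) >= 8
--                                for v in content.values()):
--             best = rank
--     return f"{company_name}{comments[best]}"
-- ===== Notes on version B (the rewrite author's own statement) =====
-- stated objective: alternative
-- what changed: B makes a single pass over analysis_results.items() maintaining a minimum-priority-rank accumulator and indexes a comment table with the final rank, instead of A's three staged get-then-scan blocks with early exit and an if/elif string dispatch; Pre_ only excludes association lists giving a section name twice, which no Python dict can represent.
import Mathlib
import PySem

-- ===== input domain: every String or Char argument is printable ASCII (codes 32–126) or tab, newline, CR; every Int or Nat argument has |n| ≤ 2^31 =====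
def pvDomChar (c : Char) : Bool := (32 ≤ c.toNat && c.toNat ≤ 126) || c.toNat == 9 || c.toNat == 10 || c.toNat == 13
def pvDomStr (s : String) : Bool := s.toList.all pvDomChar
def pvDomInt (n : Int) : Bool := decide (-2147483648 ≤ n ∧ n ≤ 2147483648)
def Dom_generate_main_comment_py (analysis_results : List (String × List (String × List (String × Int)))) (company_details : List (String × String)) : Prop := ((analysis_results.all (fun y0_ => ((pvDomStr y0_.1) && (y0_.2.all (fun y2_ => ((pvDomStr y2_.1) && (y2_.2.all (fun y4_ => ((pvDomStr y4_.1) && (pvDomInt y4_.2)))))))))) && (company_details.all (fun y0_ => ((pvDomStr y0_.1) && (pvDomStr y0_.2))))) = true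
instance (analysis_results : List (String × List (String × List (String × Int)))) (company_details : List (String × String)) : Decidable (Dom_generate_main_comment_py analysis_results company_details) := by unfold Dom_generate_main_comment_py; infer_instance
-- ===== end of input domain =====

-- B makes one pass over analysis_results keeping a minimum-priority-rank accumulator
-- and indexes a comment table with the result, instead of A's three staged
-- get-then-scan blocks with early exit and an if/elif dispatch (alternative).


-- shared primitive: Python dict.get on an association list (first match)
def dget {α : Type} (l : List (String × α)) (k : String) : Option α :=
  PySem.Dict.get? (PySem.Dict.mk l) k

-- ===== PORT A =====
-- A's for-loop with break over a section: first key whose value has final_score >= 8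
def scanA : List (String × List (String × Int)) → Option String
  | [] => none
  | (k, v) :: rest =>
      if 8 ≤ ((dget v "final_score").getD 0) then some k else scanA rest

def generate_main_comment_py (analysis_results : List (String × List (String × List (String × Int)))) (company_details : List (String × String)) : String :=
  -- company_name = company_details.get("name"); f"{None}" renders as "None"
  let companyName := (dget company_details "name").getD "None"
  -- check ProductMarketFit first
  let pmf := (dget analysis_results "ProductMarketFit").getD []
  let hs0 : Option String :=
    match scanA pmf with
    | some _ => some "ProductMarketFit"
    | none => none
  -- if no strong PMF, check market
  let hs1 : Option String :=
    if hs0.isNone then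
      match scanA ((dget analysis_results "MarketAnalysis").getD []) with
      | some _ => some "MarketAnalysis"
      | none => none
    else hs0
  -- if still no highlight, check finance
  let hs2 : Option String :=
    if hs1.isNone then
      match scanA ((dget analysis_results "Finance").getD []) with
      | some _ => some "Finance"
      | none => none
    else hs1
  if hs2 = some "ProductMarketFit" then
    companyName ++ " demonstrates strong performance in ProductMarketFit with validated metrics and market alignment."
  else if hs2 = some "MarketAnalysis" then
    companyName ++ " operates in an attractive market with validated TAM and growth potential."
  else if hs2 = some "Finance" then
    companyName ++ " shows strong financial fundamentals with sustainable growth trajectory."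
  else
    companyName ++ " presents an investment opportunity with several areas of notable strength."

-- ===== PORT B =====
-- priority = {...}
def rankTable : List (String × Int) :=
  [("ProductMarketFit", 0), ("MarketAnalysis", 1), ("Finance", 2)]

-- priority.get(section, 3)
def rankOf (s : String) : Int := (dget rankTable s).getD 3

-- comments table
def comments : List String :=
  [" demonstrates strong performance in ProductMarketFit with validated metrics and market alignment.",
   " operates in an attractive market with validated TAM and growth potential.",
   " shows strong financial fundamentals with sustainable growth trajectory.",
   " presents an investment opportunity with several areas of notable strength."]

-- any(v.get("final_score", 0) >= 8 for v in content.values())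
def sectionHit (sec : List (String × List (String × Int))) : Bool :=
  sec.any (fun p => 8 ≤ ((dget p.2 "final_score").getD 0))

def generate_main_comment_py_alt (analysis_results : List (String × List (String × List (String × Int)))) (company_details : List (String × String)) : String :=
  let companyName := (dget company_details "name").getD "None"
  -- single pass: keep the best (lowest) rank seen so far
  let best : Int := analysis_results.foldl
    (fun best p => if rankOf p.1 < best && sectionHit p.2 then rankOf p.1 else best) 3
  -- comments[best]; best is always in range, pyGet? is the exact index semantics
  companyName ++ (PySem.List.pyGet? comments best).getD ""

-- ===== PRECONDITION & SPEC =====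
-- Pre_ excludes association lists in which one of the three section names occurs as a
-- key more than once: a Python dict cannot hold duplicate keys, and there A's
-- first-match lookup and B's full scan are both defensible readings.
def Pre_generate_main_comment_py (analysis_results : List (String × List (String × List (String × Int)))) (company_details : List (String × String)) : Prop :=
  (analysis_results.map Prod.fst).count "ProductMarketFit" ≤ 1 ∧
  (analysis_results.map Prod.fst).count "MarketAnalysis" ≤ 1 ∧
  (analysis_results.map Prod.fst).count "Finance" ≤ 1
instance (analysis_results : List (String × List (String × List (String × Int)))) (company_details : List (String × String)) : Decidable (Pre_generate_main_comment_py analysis_results company_details) := by unfold Pre_generate_main_comment_py; infer_instance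

def pvWitness_generate_main_comment_py : (List (String × List (String × List (String × Int)))) × (List (String × String)) :=
  ([("ProductMarketFit", [("traction", [("final_score", 9)])])], [("name", "Acme")])

def Spec_generate_main_comment_py (analysis_results : List (String × List (String × List (String × Int)))) (company_details : List (String × String)) (out : String) : Prop := out = generate_main_comment_py_alt analysis_results company_details
instance (analysis_results : List (String × List (String × List (String × Int)))) (company_details : List (String × String)) (out : String) : Decidable (Spec_generate_main_comment_py analysis_results company_details out) := by unfold Spec_generate_main_comment_py; infer_instance

-- ===== CLAIM =====
def Claim_equal_generate_main_comment_py : Prop := ∀ (analysis_results : List (String × List (String × List (String × Int)))) (company_details : List (String × String)), Dom_generate_main_comment_py analysis_results company_details → Pre_generate_main_comment_py analysis_results company_details → Spec_generate_main_comment_py analysis_results company_details (generate_main_comment_py analysis_results company_details)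

-- ===== LEMMAS AND PROOFS =====

-- A's first-hit scan succeeds exactly when a hit exists in the section
theorem scanA_isSome (l : List (String × List (String × Int))) :
    (scanA l).isSome = sectionHit l := by
  induction l with
  | nil => simp [scanA, sectionHit]
  | cons h t ih =>
      obtain ⟨k, v⟩ := h
      by_cases hv : 8 ≤ ((dget v "final_score").getD 0) <;>
        simp [scanA, sectionHit, hv] <;> simpa [sectionHit] using ih

-- per-entry contribution of B's fold
def contrib (p : String × List (String × List (String × Int))) : Int :=
  if sectionHit p.2 then rankOf p.1 else 3

-- minimum contribution of a list (3 on empty)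
def minC : List (String × List (String × List (String × Int))) → Int
  | [] => 3
  | p :: t => min (contrib p) (minC t)

theorem minC_le_three (l : List (String × List (String × List (String × Int)))) : minC l ≤ 3 := by
  induction l with
  | nil => simp [minC]
  | cons p t ih => simp [minC]; right; exact ih

-- B's fold computes the minimum contribution
theorem fold_eq_minC (l : List (String × List (String × List (String × Int)))) :
    ∀ b : Int, b ≤ 3 →
      l.foldl (fun best p => if rankOf p.1 < best && sectionHit p.2 then rankOf p.1 else best) b
        = min b (minC l) := by
  induction l with
  | nil => intro b hb; simp [minC]; omega
  | cons p t ih =>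
      intro b hb
      have hstep : (if rankOf p.1 < b && sectionHit p.2 then rankOf p.1 else b)
          = min b (contrib p) := by
        by_cases hs : sectionHit p.2 <;> simp [contrib, hs, min_def] <;> omega
      simp only [List.foldl_cons, hstep]
      rw [ih _ (le_trans (min_le_left _ _) hb)]
      simp [minC, min_assoc]

-- "some key equal to n hits" as a bool
def anyH (l : List (String × List (String × List (String × Int)))) (n : String) : Bool :=
  l.any (fun p => p.1 == n && sectionHit p.2)

-- under no-duplicate-key Pre_, A's lookup-then-scan equals B's keyed any
theorem lookup_hit (l : List (String × List (String × List (String × Int)))) (n : String)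
    (h : (l.map Prod.fst).count n ≤ 1) :
    sectionHit ((dget l n).getD []) = anyH l n := by
  induction l with
  | nil => simp [dget, anyH, PySem.Dict.get?, sectionHit]
  | cons p t ih =>
      obtain ⟨k, v⟩ := p
      by_cases hk : k = n
      · subst hk
        have hz : (t.map Prod.fst).count k = 0 := by
          simp at h; omega
        have hnone : anyH t k = false := by
          simp only [anyH, List.any_eq_false]
          intro p hp
          have hne : p.1 ≠ k := by
            intro he
            rw [List.count_eq_zero] at hz
            exact hz (List.mem_map.mpr ⟨p, hp, he⟩)
          simp [hne]
        rw [show dget ((k, v) :: t) k = some v by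
              simp [dget, PySem.Dict.get?_mk_cons]]
        simp only [anyH] at hnone
        simp only [anyH, List.any_cons, beq_self_eq_true, Bool.true_and, hnone,
          Bool.or_false, Option.getD_some]
      · have hc : (t.map Prod.fst).count n ≤ 1 := by
          simp [hk] at h ⊢; omega
        rw [show dget ((k, v) :: t) n = dget t n by
              simp [dget, PySem.Dict.get?_mk_cons, hk]]
        simp only [anyH, List.any_cons, show (k == n) = false by simp [hk],
          Bool.false_and, Bool.false_or]
        exact ih hc

-- minC as the priority if-chain over the keyed anys
theorem minC_chain (l : List (String × List (String × List (String × Int)))) :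
    minC l = (if anyH l "ProductMarketFit" then 0
              else if anyH l "MarketAnalysis" then 1
              else if anyH l "Finance" then 2 else 3) := by
  induction l with
  | nil => simp [minC, anyH]
  | cons p t ih =>
      obtain ⟨k, v⟩ := p
      simp only [minC, ih, anyH, List.any_cons]
      by_cases hs : sectionHit v
      · simp only [hs, Bool.and_true, contrib]
        by_cases h0 : k = "ProductMarketFit"
        · subst h0
          simp only [show rankOf "ProductMarketFit" = 0 from rfl]
          split_ifs with _ _ _ <;> simp_all
        · by_cases h1 : k = "MarketAnalysis"
          · subst h1
            simp only [show rankOf "MarketAnalysis" = 1 from rfl,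
              show ("MarketAnalysis" == "ProductMarketFit") = false from rfl,
              Bool.false_or]
            split_ifs <;> simp_all
          · by_cases h2 : k = "Finance"
            · subst h2
              simp only [show rankOf "Finance" = 2 from rfl,
                show ("Finance" == "ProductMarketFit") = false from rfl,
                show ("Finance" == "MarketAnalysis") = false from rfl, Bool.false_or]
              split_ifs <;> simp_all
            · have hb0 : ("ProductMarketFit" == k) = false := by simp [Ne.symm h0]
              have hb1 : ("MarketAnalysis" == k) = false := by simp [Ne.symm h1]
              have hb2 : ("Finance" == k) = false := by simp [Ne.symm h2]
              have hr : rankOf k = 3 := by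
                simp [rankOf, dget, rankTable, PySem.Dict.get?, List.find?,
                  hb0, hb1, hb2]
              simp only [hr, show (k == "ProductMarketFit") = false by simp [h0],
                show (k == "MarketAnalysis") = false by simp [h1],
                show (k == "Finance") = false by simp [h2], Bool.false_or]
              split_ifs <;> simp_all
      · simp only [hs, Bool.and_false, Bool.false_or, contrib]
        split_ifs <;> simp_all

-- ===== VERDICT =====
theorem generate_main_comment_py_spec : Claim_equal_generate_main_comment_py := by
  intro ar cd _ hpre
  obtain ⟨h0, h1, h2⟩ := hpre
  unfold Spec_generate_main_comment_py
  unfold generate_main_comment_py generate_main_comment_py_alt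
  rw [fold_eq_minC ar 3 le_rfl, min_eq_right (minC_le_three ar), minC_chain ar]
  have e0 := (lookup_hit ar _ h0).symm
  have e1 := (lookup_hit ar _ h1).symm
  have e2 := (lookup_hit ar _ h2).symm
  have s0 := scanA_isSome ((dget ar "ProductMarketFit").getD [])
  have s1 := scanA_isSome ((dget ar "MarketAnalysis").getD [])
  have s2 := scanA_isSome ((dget ar "Finance").getD [])
  rcases q0 : scanA ((dget ar "ProductMarketFit").getD []) with _ | k0 <;>
  rcases q1 : scanA ((dget ar "MarketAnalysis").getD []) with _ | k1 <;>
  rcases q2 : scanA ((dget ar "Finance").getD []) with _ | k2 <;>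
    simp_all [comments, PySem.List.pyGet?, PySem.List.pyIdx?]
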